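-- pv_equiv track=rewrite | github.com/c-huynh/algorithms2 | homework6/scc.py | get_ordered_vertices
-- ===== SOURCE A (Python) =====
-- def get_ordered_vertices(n, graph):
--     """
--     Returns a list where values represent the nodes and index represents
--     finishing times (of Kosaraju's algorithm)
--     """
--
--     # create a reversed graph
--     rev_graph = {}
--     for u in graph:
--         rev_graph[u] = []
--     for u in graph:
--         for v in graph[u]:
--             rev_graph[v].append(u)
--
--     ordered_vertices = []
--     times_visited = {}
--     for u in rev_graph:
--         times_visited[u] = 0
--
--     for i in sorted(rev_graph, reverse=True):
--         if times_visited[i] == 0: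
--             stack = [i]
--             while stack:
--                 v = stack[-1]
--
--                 # node visted for first time
--                 # add all unvisited adjacent vertices to stack
--                 if times_visited[v] == 0:
--                     times_visited[v] += 1
--                     for w in rev_graph[v]:
--                         if times_visited[w] == 0:
--                             stack.append(w)
--
--                 # node visited once before
--                 # record finishing time
--                 elif times_visited[v] == 1:
--                     times_visited[v] += 1
--                     ordered_vertices.append(v)
--                     stack.pop()
--
--                 # every time after second visit
--                 else:
--                     stack.pop()
--     return ordered_vertices
-- ===== SOURCE B (Python) =====
-- def get_ordered_vertices(n, graph):
--     """
--     Returns a list where values represent the nodes and index represents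
--     finishing times (of Kosaraju's algorithm)
--     """
--
--     # create a reversed graph (same construction as before)
--     rev_graph = {}
--     for u in graph:
--         rev_graph[u] = []
--     for u in graph:
--         for v in graph[u]:
--             rev_graph[v].append(u)
--
--     ordered_vertices = []
--     visited = set()
--
--     def dfs(v):
--         visited.add(v)
--         # reversed(): the explicit LIFO stack of the old code explored the
--         # last-pushed neighbour first
--         for w in reversed(rev_graph[v]):
--             if w not in visited:
--                 dfs(w)
--         ordered_vertices.append(v)
--
--     for i in sorted(rev_graph, reverse=True):
--         if i not in visited:
--             dfs(i)
--     return ordered_vertices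
-- ===== Notes on version B (the rewrite author's own statement) =====
-- stated objective: simpler
-- what changed: Replaces A's explicit stack with 0/1/2 visit counters and re-pushed entries by a recursive post-order DFS helper over reversed adjacency lists with a plain visited set; rev_graph construction and the sorted outer loop are kept.
import Mathlib
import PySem

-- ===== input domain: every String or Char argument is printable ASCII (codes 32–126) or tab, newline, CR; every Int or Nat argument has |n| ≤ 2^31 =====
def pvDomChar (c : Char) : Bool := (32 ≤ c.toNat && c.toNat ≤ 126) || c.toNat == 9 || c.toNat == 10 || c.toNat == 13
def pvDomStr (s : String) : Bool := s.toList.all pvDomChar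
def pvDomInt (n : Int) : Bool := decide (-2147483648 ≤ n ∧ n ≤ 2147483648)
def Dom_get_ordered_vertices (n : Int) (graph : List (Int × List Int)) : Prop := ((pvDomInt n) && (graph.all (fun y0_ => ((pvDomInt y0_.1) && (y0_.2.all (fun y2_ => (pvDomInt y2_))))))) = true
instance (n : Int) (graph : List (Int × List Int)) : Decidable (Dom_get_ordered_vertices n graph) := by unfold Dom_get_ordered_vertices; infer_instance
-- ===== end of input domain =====

-- B replaces A's explicit stack with 0/1/2 visit counters by a recursive post-order DFS
-- over reversed adjacency lists with a plain visited set (objective: simpler; same asymptotic cost).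

-- ===== PORT A =====

-- Both Python sources build `rev_graph` with the same three loops; this helper transliterates
-- those shared lines once (used by both ports).
-- `rev_graph[v].append(u)` is ported as Dict.modify: inside Pre_ the key v always exists, so
-- modify is exactly the append (outside Pre_ the Python raises KeyError; excluded by Pre_).
def buildRev (graph : List (Int × List Int)) : PySem.Dict Int (List Int) :=
  let g := PySem.Dict.ofList graph
  let r0 := g.keys.foldl (fun d u => d.insert u ([] : List Int)) PySem.Dict.empty
  g.keys.foldl
    (fun d u => (g.getD u []).foldl (fun d v => d.modify v [] (fun l => l ++ [u])) d) r0

-- A's inner `while stack:` loop, fuel-totalised (the fuel passed by the port is proven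
-- sufficient by the lemmas below; it only makes the recursion total).
def loopA (adj : Int → List Int) : Nat → List Int → PySem.Dict Int Int → List Int →
    PySem.Dict Int Int × List Int
  | 0, _, tm, acc => (tm, acc)
  | _ + 1, [], tm, acc => (tm, acc)
  | f + 1, v :: S, tm, acc =>
    let c := tm.getD v 0
    if c = 0 then
      let tm' := tm.insert v (c + 1)
      let st := (adj v).foldl (fun st w => if tm'.getD w 0 = 0 then w :: st else st) (v :: S)
      loopA adj f st tm' acc
    else if c = 1 then
      loopA adj f S (tm.insert v (c + 1)) (acc ++ [v])
    else
      loopA adj f S tm acc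

def get_ordered_vertices (n : Int) (graph : List (Int × List Int)) : List Int :=
  let rev := buildRev graph
  let tm0 := rev.keys.foldl (fun d u => d.insert u (0 : Int)) PySem.Dict.empty
  let fuel := 1 + rev.keys.length * (2 + (rev.values.map List.length).sum)
  ((PySem.List.sorted rev.keys (fun x => x) true).foldl
    (fun s i => if s.1.getD i 0 = 0 then loopA (fun v => rev.getD v []) fuel [i] s.1 s.2 else s)
    (tm0, [])).2

-- ===== PORT B =====

-- recursive `dfs(v)`: mark v visited, recurse on unvisited reversed neighbours, post-append v.
-- Fuel only totalises the recursion (proven sufficient below).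
def dfsB (adj : Int → List Int) : Nat → Int → PySem.Set Int × List Int →
    PySem.Set Int × List Int
  | 0, _, s => s
  | f + 1, v, s =>
    let vis1 := PySem.Set.add s.1 v
    let t := (adj v).reverse.foldl
      (fun s w => if PySem.Set.contains s.1 w then s else dfsB adj f w s) (vis1, s.2)
    (t.1, t.2 ++ [v])

def get_ordered_vertices_alt (n : Int) (graph : List (Int × List Int)) : List Int :=
  let rev := buildRev graph
  let fuel := rev.keys.length + 1
  ((PySem.List.sorted rev.keys (fun x => x) true).foldl
    (fun s i => if PySem.Set.contains s.1 i then s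
                else dfsB (fun v => rev.getD v []) fuel i s)
    (PySem.Set.empty, [])).2

-- ===== PRECONDITION & SPEC =====

-- Pre_ excludes exactly the graphs on which A raises KeyError at `rev_graph[v].append(u)`:
-- some edge target v (of the dict's effective, last-occurrence values) is not a vertex key.
-- B raises the same KeyError there.
def Pre_get_ordered_vertices (n : Int) (graph : List (Int × List Int)) : Prop :=
  ∀ v ∈ ((PySem.Dict.ofList graph).values.flatten), v ∈ graph.map Prod.fst
instance (n : Int) (graph : List (Int × List Int)) : Decidable (Pre_get_ordered_vertices n graph) := by
  unfold Pre_get_ordered_vertices; infer_instance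

def pvWitness_get_ordered_vertices : Int × (List (Int × List Int)) :=
  (3, [(0, [1]), (1, [0, 2]), (2, [])])

def Spec_get_ordered_vertices (n : Int) (graph : List (Int × List Int)) (out : List Int) : Prop := out = get_ordered_vertices_alt n graph
instance (n : Int) (graph : List (Int × List Int)) (out : List Int) : Decidable (Spec_get_ordered_vertices n graph out) := by unfold Spec_get_ordered_vertices; infer_instance

-- ===== CLAIM (what is proved, stated in full; the proofs are below) =====
def Claim_equal_get_ordered_vertices : Prop := ∀ (n : Int) (graph : List (Int × List Int)), Dom_get_ordered_vertices n graph → Pre_get_ordered_vertices n graph → Spec_get_ordered_vertices n graph (get_ordered_vertices n graph)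

-- ===== LEMMAS AND PROOFS =====

-- number of keys not yet visited: the recursion measure of the DFS
def measKS (ks vis : List Int) : Nat := ks.countP (fun u => decide (u ∉ vis))

-- A's counter dict read through B's visited set and the current DFS path P:
-- 1 on the path, 2 on finished (visited, off-path) vertices, 0 elsewhere.
def SyncTV (tm : PySem.Dict Int Int) (vis P : List Int) : Prop :=
  ∀ u : Int, tm.getD u 0 = (if u ∈ P then 1 else if u ∈ vis then 2 else 0)

theorem loopA_nil (adj : Int → List Int) (f : Nat) (tm : PySem.Dict Int Int) (acc : List Int) :
    loopA adj f [] tm acc = (tm, acc) := by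
  cases f <;> simp [loopA]

theorem loopA_cons_visit (adj : Int → List Int) (f : Nat) (v : Int) (S : List Int)
    (tm : PySem.Dict Int Int) (acc : List Int) (h : tm.getD v 0 = 0) :
    loopA adj (f + 1) (v :: S) tm acc =
      loopA adj f
        ((adj v).foldl (fun st w => if (tm.insert v 1).getD w 0 = 0 then w :: st else st) (v :: S))
        (tm.insert v 1) acc := by
  simp [loopA, h]

theorem loopA_cons_finish (adj : Int → List Int) (f : Nat) (v : Int) (S : List Int)
    (tm : PySem.Dict Int Int) (acc : List Int) (h : tm.getD v 0 = 1) :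
    loopA adj (f + 1) (v :: S) tm acc = loopA adj f S (tm.insert v 2) (acc ++ [v]) := by
  norm_num [loopA, h]

theorem loopA_cons_pop (adj : Int → List Int) (f : Nat) (v : Int) (S : List Int)
    (tm : PySem.Dict Int Int) (acc : List Int) (h0 : tm.getD v 0 ≠ 0) (h1 : tm.getD v 0 ≠ 1) :
    loopA adj (f + 1) (v :: S) tm acc = loopA adj f S tm acc := by
  simp [loopA, h0, h1]

theorem foldl_push_filter (p : Int → Prop) [DecidablePred p] :
    ∀ (l st : List Int),
      l.foldl (fun st w => if p w then w :: st else st) st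
        = (l.filter (fun w => decide (p w))).reverse ++ st
  | [], st => rfl
  | w :: l, st => by
    by_cases h : p w <;>
      simp [List.foldl_cons, h, foldl_push_filter p l]

theorem measKS_le (ks vis : List Int) : measKS ks vis ≤ ks.length :=
  List.countP_le_length

theorem measKS_pos (ks vis : List Int) (v : Int) (hvk : v ∈ ks) (hv : v ∉ vis) :
    1 ≤ measKS ks vis :=
  List.countP_pos_iff.mpr ⟨v, hvk, by simp [hv]⟩

theorem measKS_append (ks : List Int) (hnd : ks.Nodup) (vis : List Int) (v : Int)
    (hvk : v ∈ ks) (hv : v ∉ vis) : measKS ks (vis ++ [v]) + 1 = measKS ks vis := by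
  induction ks with
  | nil => cases hvk
  | cons a t ih =>
    rcases List.nodup_cons.mp hnd with ⟨hat, hndt⟩
    rcases List.mem_cons.mp hvk with hva | hvt
    · subst hva
      have hteq : t.countP (fun u => decide (u ∉ (vis ++ [v]))) =
          t.countP (fun u => decide (u ∉ vis)) := by
        apply List.countP_congr
        intro x hx
        have hxv : x ≠ v := fun he => hat (he ▸ hx)
        simp [List.mem_append, hxv]
      simp only [measKS, List.countP_cons] at *
      rw [hteq]
      simp [hv, List.mem_append]
    · have hav : a ≠ v := fun he => hat (he ▸ hvt)
      have hrec := ih hndt hvt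
      have hhead : (decide (a ∉ (vis ++ [v])) : Bool) = decide (a ∉ vis) := by
        simp [List.mem_append, hav]
      simp only [measKS, List.countP_cons] at *
      rw [hhead]
      omega

theorem SyncTV_mark (tm : PySem.Dict Int Int) (vis P : List Int) (v : Int)
    (h : SyncTV tm vis P) :
    SyncTV (tm.insert v 1) (vis ++ [v]) (v :: P) := by
  intro u
  rw [PySem.Dict.getD_insert]
  by_cases huv : u = v
  · simp [huv]
  · rw [if_neg huv, h u]
    have h1 : (u ∈ v :: P) ↔ u ∈ P := by simp [List.mem_cons, huv]
    have h2 : (u ∈ vis ++ [v]) ↔ u ∈ vis := by simp [List.mem_append, huv]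
    rw [if_congr h1 rfl rfl, if_congr h2 rfl rfl]

theorem SyncTV_finish (tm : PySem.Dict Int Int) (vis P : List Int) (v : Int)
    (h : SyncTV tm vis (v :: P)) (hvv : v ∈ vis) (hvP : v ∉ P) :
    SyncTV (tm.insert v 2) vis P := by
  intro u
  rw [PySem.Dict.getD_insert]
  by_cases huv : u = v
  · simp [huv, hvP, hvv]
  · rw [if_neg huv, h u]
    have h1 : (u ∈ v :: P) ↔ u ∈ P := by simp [List.mem_cons, huv]
    rw [if_congr h1 rfl rfl]

-- the inner fold over the pending (reversed-adjacency) list matches A's processing of the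
-- pushed stack entries; takes the one-vertex statement at smaller measure as hypothesis IH
theorem inner_main (adj : Int → List Int) (ks : List Int) (E : Nat) (m : Nat)
    (IH : ∀ (v : Int) (vis acc : List Int) (tm : PySem.Dict Int Int) (P : List Int) (fB : Nat),
      measKS ks vis ≤ m → SyncTV tm vis P → vis.Nodup → (∀ u ∈ vis, u ∈ ks) →
      (∀ u ∈ P, u ∈ vis) → v ∈ ks → v ∉ vis → measKS ks vis + 1 ≤ fB →
      ∃ (k : Nat) (tm' : PySem.Dict Int Int) (vis' acc' : List Int),
        dfsB adj fB v (vis, acc) = (vis', acc') ∧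
        (∀ (fA : Nat) (S : List Int), loopA adj (fA + k) (v :: S) tm acc = loopA adj fA S tm' acc') ∧
        SyncTV tm' vis' P ∧ vis'.Nodup ∧ (∀ u ∈ vis', u ∈ ks) ∧
        (∀ u ∈ vis, u ∈ vis') ∧ v ∈ vis' ∧
        measKS ks vis' + 1 ≤ measKS ks vis ∧
        k ≤ (2 + E) * (measKS ks vis - measKS ks vis')) :
    ∀ (us vis0 vis acc : List Int) (tm : PySem.Dict Int Int) (P : List Int) (f : Nat),
      measKS ks vis ≤ m → SyncTV tm vis P → vis.Nodup → (∀ u ∈ vis, u ∈ ks) →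
      (∀ u ∈ P, u ∈ vis0) → (∀ u ∈ vis0, u ∈ vis) → (∀ w ∈ us, w ∈ ks) →
      measKS ks vis + 1 ≤ f →
      ∃ (k : Nat) (tm' : PySem.Dict Int Int) (vis' acc' : List Int),
        us.foldl (fun s w => if PySem.Set.contains s.1 w then s else dfsB adj f w s) (vis, acc)
          = (vis', acc') ∧
        (∀ (fA : Nat) (S : List Int),
          loopA adj (fA + k) ((us.filter (fun w => !(List.contains vis0 w))) ++ S) tm acc
            = loopA adj fA S tm' acc') ∧
        SyncTV tm' vis' P ∧ vis'.Nodup ∧ (∀ u ∈ vis', u ∈ ks) ∧ (∀ u ∈ vis, u ∈ vis') ∧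
        measKS ks vis' ≤ measKS ks vis ∧
        k ≤ us.length + (2 + E) * (measKS ks vis - measKS ks vis') := by
  intro us
  induction us with
  | nil =>
    intro vis0 vis acc tm P f _ hSync hndv hksv _ _ _ _
    exact ⟨0, tm, vis, acc, rfl, by intro fA S; rfl, hSync, hndv, hksv,
      fun u h => h, le_refl _, by omega⟩
  | cons w us' ihus =>
    intro vis0 vis acc tm P f hm hSync hndv hksv hPv0 hv0v hus hf
    have husw : w ∈ ks := hus w (by simp)
    have hus' : ∀ x ∈ us', x ∈ ks := fun x hx => hus x (by simp [hx])
    by_cases hw0 : w ∈ vis0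
    · -- filtered out at push time; B sees it already visited
      have hcontv : PySem.Set.contains vis w = true :=
        List.contains_iff_mem.mpr (hv0v w hw0)
      rcases ihus vis0 vis acc tm P f hm hSync hndv hksv hPv0 hv0v hus' hf with
        ⟨k, tm', vis', acc', hB, hA, hS, hN, hK, hsub, hms, hk⟩
      refine ⟨k, tm', vis', acc', ?_, ?_, hS, hN, hK, hsub, hms,
        by simp only [List.length_cons]
           exact le_trans hk (Nat.add_le_add_right (Nat.le_succ _) _)⟩
      · simp only [List.foldl_cons]
        rw [if_pos hcontv]
        exact hB
      · intro fA S
        have hfil0 : (w :: us').filter (fun w => !(List.contains vis0 w)) =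
            us'.filter (fun w => !(List.contains vis0 w)) := by
          simp [hw0]
        rw [hfil0]; exact hA fA S
    · have hfil : (w :: us').filter (fun w => !(List.contains vis0 w)) =
          w :: us'.filter (fun w => !(List.contains vis0 w)) := by
        simp [hw0]
      have hwP : w ∉ P := fun h => hw0 (hPv0 w h)
      by_cases hwv : w ∈ vis
      · -- visited since the push: A silently pops (count 2), B skips
        have hcontv : PySem.Set.contains vis w = true := List.contains_iff_mem.mpr hwv
        rcases ihus vis0 vis acc tm P f hm hSync hndv hksv hPv0 hv0v hus' hf with
          ⟨k, tm', vis', acc', hB, hA, hS, hN, hK, hsub, hms, hk⟩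
        refine ⟨k + 1, tm', vis', acc', ?_, ?_, hS, hN, hK, hsub, hms,
          by simp only [List.length_cons]
             generalize (2 + E) * (measKS ks vis - measKS ks vis') = t at hk ⊢
             omega⟩
        · simp only [List.foldl_cons]
          rw [if_pos hcontv]
          exact hB
        · intro fA S
          rw [hfil]
          have hc2 : tm.getD w 0 = 2 := by rw [hSync w]; simp [hwP, hwv]
          have hstep : ∀ g : Nat, loopA adj (g + 1)
              ((w :: us'.filter (fun w => !(List.contains vis0 w))) ++ S) tm acc =
              loopA adj g ((us'.filter (fun w => !(List.contains vis0 w))) ++ S) tm acc := by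
            intro g
            exact loopA_cons_pop adj g w _ tm acc (by rw [hc2]; norm_num) (by rw [hc2]; norm_num)
          have : fA + (k + 1) = (fA + k) + 1 := by omega
          rw [this, hstep (fA + k)]
          exact hA fA S
      · -- a genuinely new vertex: one whole DFS segment (IH at smaller measure)
        have hcf : ¬ (PySem.Set.contains vis w = true) :=
          fun hc => hwv (List.contains_iff_mem.mp hc)
        rcases IH w vis acc tm P f hm hSync hndv hksv
          (fun u hu => hv0v u (hPv0 u hu)) husw hwv hf with
          ⟨kw, tm2, vis2, acc2, hBw, hAw, hS2, hN2, hK2, hsub2, hwv2, hms2, hkw⟩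
        rcases ihus vis0 vis2 acc2 tm2 P f (by omega) hS2 hN2 hK2 hPv0
          (fun u hu => hsub2 u (hv0v u hu)) hus' (by omega) with
          ⟨k', tm', vis', acc', hB', hA', hS', hN', hK', hsub', hms', hk'⟩
        refine ⟨kw + k', tm', vis', acc', ?_, ?_, hS', hN',
          hK', fun u hu => hsub' u (hsub2 u hu), by omega, ?_⟩
        · simp only [List.foldl_cons]
          rw [if_neg hcf, hBw]
          exact hB'
        · intro fA S
          rw [hfil]
          have h1 : fA + (kw + k') = ((fA + k') + kw) := by omega
          rw [h1, List.cons_append, hAw (fA + k') _]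
          exact hA' fA S
        · -- arithmetic for the step bound
          have hsum : (2 + E) * (measKS ks vis - measKS ks vis2) +
              (2 + E) * (measKS ks vis2 - measKS ks vis') =
              (2 + E) * (measKS ks vis - measKS ks vis') := by
            rw [← Nat.mul_add]
            congr 1
            omega
          calc kw + k' ≤ (2 + E) * (measKS ks vis - measKS ks vis2) +
                (us'.length + (2 + E) * (measKS ks vis2 - measKS ks vis')) :=
                Nat.add_le_add hkw hk'
            _ = us'.length + ((2 + E) * (measKS ks vis - measKS ks vis2) +
                (2 + E) * (measKS ks vis2 - measKS ks vis')) := by ring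
            _ = us'.length + (2 + E) * (measKS ks vis - measKS ks vis') := by rw [hsum]
            _ ≤ (w :: us').length + (2 + E) * (measKS ks vis - measKS ks vis') := by
                simp [List.length_cons]

-- one DFS segment: A's stack run from (v :: S) back to S equals B's recursive dfs(v)
theorem seg_main (adj : Int → List Int) (ks : List Int) (E : Nat)
    (hnd : ks.Nodup) (hcl : ∀ u, ∀ w ∈ adj u, w ∈ ks) (hE : ∀ u, (adj u).length ≤ E) :
    ∀ (m : Nat) (v : Int) (vis acc : List Int) (tm : PySem.Dict Int Int) (P : List Int) (fB : Nat),
      measKS ks vis ≤ m → SyncTV tm vis P → vis.Nodup → (∀ u ∈ vis, u ∈ ks) →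
      (∀ u ∈ P, u ∈ vis) → v ∈ ks → v ∉ vis → measKS ks vis + 1 ≤ fB →
      ∃ (k : Nat) (tm' : PySem.Dict Int Int) (vis' acc' : List Int),
        dfsB adj fB v (vis, acc) = (vis', acc') ∧
        (∀ (fA : Nat) (S : List Int), loopA adj (fA + k) (v :: S) tm acc = loopA adj fA S tm' acc') ∧
        SyncTV tm' vis' P ∧ vis'.Nodup ∧ (∀ u ∈ vis', u ∈ ks) ∧
        (∀ u ∈ vis, u ∈ vis') ∧ v ∈ vis' ∧
        measKS ks vis' + 1 ≤ measKS ks vis ∧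
        k ≤ (2 + E) * (measKS ks vis - measKS ks vis') := by
  intro m
  induction m with
  | zero =>
    intro v vis acc tm P fB hm _ _ _ _ hvk hvv _
    have := measKS_pos ks vis v hvk hvv
    omega
  | succ m IHm =>
    intro v vis acc tm P fB hm hSync hndv hksv hPv hvk hvv hfB
    cases fB with
    | zero => omega
    | succ f =>
      have hvP : v ∉ P := fun h => hvv (hPv v h)
      have hc0 : tm.getD v 0 = 0 := by rw [hSync v]; simp [hvP, hvv]
      have hadd : PySem.Set.add vis v = vis ++ [v] := by
        simp [PySem.Set.add, hvv]
      have hm1 : measKS ks (vis ++ [v]) + 1 = measKS ks vis :=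
        measKS_append ks hnd vis v hvk hvv
      have hmark : SyncTV (tm.insert v 1) (vis ++ [v]) (v :: P) :=
        SyncTV_mark tm vis P v hSync
      have hnd1 : (vis ++ [v]).Nodup := by
        refine List.Nodup.append hndv (List.nodup_singleton v) ?_
        intro a ha hb
        simp only [List.mem_singleton] at hb
        exact hvv (hb ▸ ha)
      have hks1 : ∀ u ∈ vis ++ [v], u ∈ ks := by
        intro u hu
        rcases List.mem_append.mp hu with h | h
        · exact hksv u h
        · simp at h; exact h ▸ hvk
      rcases inner_main adj ks E m IHm ((adj v).reverse) (vis ++ [v]) (vis ++ [v])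
        acc (tm.insert v 1) (v :: P) f (by omega) hmark hnd1 hks1
        (by intro u hu; rcases List.mem_cons.mp hu with h | h
            · simp [h]
            · simp [hPv u h])
        (fun u h => h)
        (by intro x hx; exact hcl v x (List.mem_reverse.mp hx))
        (by omega) with
        ⟨kin, tm2, vis2, acc2, hBin, hAin, hS2, hN2, hK2, hsub2, hms2, hkin⟩
      have hvvis2 : v ∈ vis2 := hsub2 v (by simp)
      refine ⟨kin + 2, tm2.insert v 2, vis2, acc2 ++ [v], ?_, ?_, ?_, hN2, hK2,
        fun u hu => hsub2 u (by simp [hu]), hvvis2, by omega, ?_⟩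
      · -- B's dfs unfolds to the inner fold plus the post-append
        show dfsB adj (f + 1) v (vis, acc) = (vis2, acc2 ++ [v])
        simp only [dfsB, hadd, hBin]
      · intro fA S
        have harith : fA + (kin + 2) = (((fA + 1) + kin) + 1) := by omega
        rw [harith, loopA_cons_visit adj _ v S tm acc hc0]
        have hpush : (adj v).foldl
            (fun st w => if (tm.insert v 1).getD w 0 = 0 then w :: st else st) (v :: S) =
            ((adj v).reverse.filter (fun w => !(List.contains (vis ++ [v]) w))) ++ (v :: S) := by
          rw [foldl_push_filter (fun w => (tm.insert v 1).getD w 0 = 0) (adj v) (v :: S)]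
          rw [← List.filter_reverse]
          congr 1
          apply List.filter_congr
          intro x _
          rw [hmark x]
          by_cases hx1 : x ∈ v :: P
          · have hxm : x ∈ vis ++ [v] := by
              rcases List.mem_cons.mp hx1 with h | h
              · simp [h]
              · simp [hPv x h]
            simp [hx1, hxm]
          · by_cases hx2 : x ∈ vis ++ [v] <;>
              simp [hx1, hx2]
        rw [hpush, hAin (fA + 1) (v :: S)]
        have hc1 : tm2.getD v 0 = 1 := by rw [hS2 v]; simp
        exact loopA_cons_finish adj fA v S tm2 acc2 hc1
      · exact SyncTV_finish tm2 vis2 P v hS2 hvvis2 hvP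
      · -- step-count bound
        have hx : measKS ks vis - measKS ks vis2 = (measKS ks (vis ++ [v]) - measKS ks vis2) + 1 := by
          omega
        rw [hx, Nat.mul_succ]
        have hlen : (adj v).reverse.length ≤ E := by
          rw [List.length_reverse]; exact hE v
        have := hkin
        generalize hgen : (2 + E) * (measKS ks (vis ++ [v]) - measKS ks vis2) = t at this ⊢
        omega

-- the outer loop over the (sorted) vertices
theorem outer_main (adj : Int → List Int) (ks : List Int) (E : Nat)
    (hnd : ks.Nodup) (hcl : ∀ u, ∀ w ∈ adj u, w ∈ ks) (hE : ∀ u, (adj u).length ≤ E)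
    (F fB : Nat) (hF : 1 + ks.length * (2 + E) ≤ F) (hfB : ks.length + 1 ≤ fB) :
    ∀ (ss vis acc : List Int) (tm : PySem.Dict Int Int),
      SyncTV tm vis [] → vis.Nodup → (∀ u ∈ vis, u ∈ ks) → (∀ i ∈ ss, i ∈ ks) →
      (ss.foldl (fun s i => if s.1.getD i 0 = 0 then loopA adj F [i] s.1 s.2 else s) (tm, acc)).2 =
      (ss.foldl (fun s i => if PySem.Set.contains s.1 i then s else dfsB adj fB i s) (vis, acc)).2 := by
  intro ss
  induction ss with
  | nil => intro vis acc tm _ _ _ _; rfl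
  | cons i ss' ih =>
    intro vis acc tm hSync hndv hksv hss
    have hik : i ∈ ks := hss i (by simp)
    have hss' : ∀ x ∈ ss', x ∈ ks := fun x hx => hss x (by simp [hx])
    by_cases hiv : i ∈ vis
    · have hgi : tm.getD i 0 = 2 := by rw [hSync i]; simp [hiv]
      have hcont : PySem.Set.contains vis i = true := List.contains_iff_mem.mpr hiv
      have hAne : ¬ (tm.getD i 0 = 0) := by rw [hgi]; norm_num
      simp only [List.foldl_cons]
      rw [if_neg hAne, if_pos hcont]
      exact ih vis acc tm hSync hndv hksv hss'
    · have hgi : tm.getD i 0 = 0 := by rw [hSync i]; simp [hiv]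
      have hcf : ¬ (PySem.Set.contains vis i = true) :=
        fun hc => hiv (List.contains_iff_mem.mp hc)
      rcases seg_main adj ks E hnd hcl hE (measKS ks vis) i vis acc tm [] fB (le_refl _)
        hSync hndv hksv (by simp) hik hiv
        (by have := measKS_le ks vis; omega) with
        ⟨k, tm', vis', acc', hB, hA, hS', hN', hK', _, _, _, hk⟩
      have hkF : k + 1 ≤ F := by
        have h1 : (2 + E) * (measKS ks vis - measKS ks vis') ≤ (2 + E) * ks.length :=
          Nat.mul_le_mul_left _ (le_trans (Nat.sub_le _ _) (measKS_le ks vis))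
        have h2 : (2 + E) * ks.length = ks.length * (2 + E) := Nat.mul_comm _ _
        generalize (2 + E) * (measKS ks vis - measKS ks vis') = t1 at h1 hk
        generalize (2 + E) * ks.length = t2 at h1 h2
        omega
      have hloop : loopA adj F [i] tm acc = (tm', acc') := by
        have hFeq : F = (F - k) + k := by omega
        rw [hFeq, hA (F - k) []]
        exact loopA_nil adj _ tm' acc'
      simp only [List.foldl_cons]
      rw [if_pos hgi, if_neg hcf, hloop, hB]
      exact ih vis' acc' tm' hS' hN' hK' hss'

-- ===== facts about buildRev and the initial counter dict =====

theorem insfold_getD_zero (l : List Int) :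
    ∀ (d : PySem.Dict Int Int), (∀ u, d.getD u 0 = 0) →
      ∀ u, (l.foldl (fun d u => d.insert u (0 : Int)) d).getD u 0 = 0 := by
  induction l with
  | nil => intro d h u; exact h u
  | cons a l ih =>
    intro d h u
    simp only [List.foldl_cons]
    apply ih
    intro x
    rw [PySem.Dict.getD_insert]
    by_cases hx : x = a <;> simp [hx, h x]

theorem insfold_getD_nil (l : List Int) :
    ∀ (d : PySem.Dict Int (List Int)), (∀ u, d.getD u [] = []) →
      ∀ u, (l.foldl (fun d u => d.insert u ([] : List Int)) d).getD u [] = [] := by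
  induction l with
  | nil => intro d h u; exact h u
  | cons a l ih =>
    intro d h u
    simp only [List.foldl_cons]
    apply ih
    intro x
    rw [PySem.Dict.getD_insert]
    by_cases hx : x = a <;> simp [hx, h x]

theorem modifyfold_content (Q : Int → Prop) (u : Int) (hu : Q u) :
    ∀ (vs : List Int) (d : PySem.Dict Int (List Int)),
      (∀ x w, w ∈ d.getD x [] → Q w) →
      ∀ x w, w ∈ ((vs.foldl (fun d v => d.modify v [] (fun l => l ++ [u])) d).getD x []) → Q w := by
  intro vs
  induction vs with
  | nil => intro d h; exact h
  | cons a vs ih =>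
    intro d h
    simp only [List.foldl_cons]
    apply ih
    intro x w hw
    rw [PySem.Dict.getD_modify] at hw
    by_cases hx : x = a
    · rw [if_pos hx] at hw
      rcases List.mem_append.mp hw with h' | h'
      · exact h a w h'
      · simp at h'; exact h' ▸ hu
    · rw [if_neg hx] at hw
      exact h x w hw

theorem outerfold_content (g : PySem.Dict Int (List Int)) (Q : Int → Prop) :
    ∀ (l : List Int) (d : PySem.Dict Int (List Int)),
      (∀ u ∈ l, Q u) → (∀ x w, w ∈ d.getD x [] → Q w) →
      ∀ x w, w ∈ ((l.foldl
        (fun d u => (g.getD u []).foldl (fun d v => d.modify v [] (fun l => l ++ [u])) d) d).getD x [])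
        → Q w := by
  intro l
  induction l with
  | nil => intro d _ h; exact h
  | cons a l ih =>
    intro d hl h
    simp only [List.foldl_cons]
    exact ih _ (fun u hu => hl u (by simp [hu]))
      (modifyfold_content Q a (hl a (by simp)) (g.getD a []) d h)

theorem modifyfold_mem_keys (u : Int) (vs : List Int) (d : PySem.Dict Int (List Int)) (x : Int)
    (hx : x ∈ d.keys) :
    x ∈ ((vs.foldl (fun d v => d.modify v [] (fun l => l ++ [u])) d)).keys := by
  rw [PySem.Dict.keys_foldl_modify vs [] (fun _ _ => (· ++ [u])) d]
  exact (PySem.Set.mem_update d.keys vs x).mpr (Or.inl hx)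

theorem outerfold_mem_keys (g : PySem.Dict Int (List Int)) :
    ∀ (l : List Int) (d : PySem.Dict Int (List Int)) (x : Int), x ∈ d.keys →
      x ∈ ((l.foldl
        (fun d u => (g.getD u []).foldl (fun d v => d.modify v [] (fun l => l ++ [u])) d) d)).keys := by
  intro l
  induction l with
  | nil => intro d x h; exact h
  | cons a l ih =>
    intro d x hx
    simp only [List.foldl_cons]
    exact ih _ x (modifyfold_mem_keys a (g.getD a []) d x hx)

theorem outerfold_nodup_keys (g : PySem.Dict Int (List Int)) :
    ∀ (l : List Int) (d : PySem.Dict Int (List Int)), d.keys.Nodup →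
      ((l.foldl
        (fun d u => (g.getD u []).foldl (fun d v => d.modify v [] (fun l => l ++ [u])) d) d)).keys.Nodup := by
  intro l
  induction l with
  | nil => intro d h; exact h
  | cons a l ih =>
    intro d hd
    simp only [List.foldl_cons]
    exact ih _ (PySem.Dict.nodup_keys_foldl_modify_key (g.getD a []) (fun v => v) []
      (fun _ _ => (· ++ [a])) d hd)

theorem nodup_keys_buildRev (graph : List (Int × List Int)) : (buildRev graph).keys.Nodup := by
  unfold buildRev
  apply outerfold_nodup_keys
  have : (PySem.Dict.empty : PySem.Dict Int (List Int)).keys.Nodup := by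
    simp [PySem.Dict.keys_empty]
  exact PySem.Dict.nodup_keys_foldl_insert _ (fun _ _ => []) _ this

theorem buildRev_closed (graph : List (Int × List Int)) :
    ∀ x w, w ∈ (buildRev graph).getD x [] → w ∈ (buildRev graph).keys := by
  intro x w hw
  unfold buildRev at hw ⊢
  set g := PySem.Dict.ofList graph with hg
  set r0 := g.keys.foldl (fun d u => d.insert u ([] : List Int)) PySem.Dict.empty with hr0
  -- contents of every bucket are keys of g
  have hQ : w ∈ g.keys := by
    refine outerfold_content g (· ∈ g.keys) g.keys r0 (fun u hu => hu) ?_ x w hw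
    intro y z hz
    have : r0.getD y [] = [] := by
      apply insfold_getD_nil
      intro u
      simp [PySem.Dict.getD_empty]
    rw [this] at hz
    cases hz
  -- and every key of g is a key of r0, hence of the final dict
  have hr0k : w ∈ r0.keys := by
    rw [hr0, PySem.Dict.keys_foldl_insert g.keys (fun _ _ => []) PySem.Dict.empty]
    refine (PySem.Set.mem_update _ _ _).mpr (Or.inr hQ)
  exact outerfold_mem_keys g g.keys r0 w hr0k

theorem buildRev_len_le (rev : PySem.Dict Int (List Int)) (u : Int) :
    (rev.getD u []).length ≤ ((rev.values.map List.length).sum) := by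
  cases hc : rev.contains u
  · rw [PySem.Dict.getD_of_not_contains rev [] hc]
    simp
  · have hsome : (rev.get? u).isSome := by
      rw [← PySem.Dict.contains_eq_isSome_get?]; exact hc
    rcases Option.isSome_iff_exists.mp hsome with ⟨val, hval⟩
    rw [PySem.Dict.getD_of_get?_eq_some rev [] hval]
    have hmem : val ∈ rev.values := by
      have := PySem.Dict.mem_items_of_get?_eq_some rev hval
      simp only [PySem.Dict.values]
      exact List.mem_map_of_mem this
    have : val.length ∈ rev.values.map List.length := List.mem_map_of_mem hmem
    exact List.single_le_sum (fun x _ => Nat.zero_le x) _ this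

theorem main_equiv (n : Int) (graph : List (Int × List Int)) :
    get_ordered_vertices n graph = get_ordered_vertices_alt n graph := by
  unfold get_ordered_vertices get_ordered_vertices_alt
  set rev := buildRev graph with hrev
  set ks := rev.keys with hks
  set adj := fun v => rev.getD v [] with hadj
  set E := ((rev.values.map List.length).sum) with hEdef
  have hnd : ks.Nodup := nodup_keys_buildRev graph
  have hcl : ∀ u, ∀ w ∈ adj u, w ∈ ks := fun u w hw => buildRev_closed graph u w hw
  have hE : ∀ u, (adj u).length ≤ E := fun u => buildRev_len_le rev u
  have hSync0 : SyncTV (ks.foldl (fun d u => d.insert u (0 : Int)) PySem.Dict.empty) [] [] := by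
    intro u
    have : ∀ x, (PySem.Dict.empty : PySem.Dict Int Int).getD x 0 = 0 := by
      intro x; simp [PySem.Dict.getD_empty]
    rw [insfold_getD_zero ks PySem.Dict.empty this u]
    simp
  exact outer_main adj ks E hnd hcl hE
    (1 + ks.length * (2 + E)) (ks.length + 1) (le_refl _) (le_refl _)
    (PySem.List.sorted ks (fun x => x) true) [] [] _
    hSync0 (by simp) (by simp)
    (fun i hi => (PySem.List.mem_sorted ks (fun x => x) true i).mp hi)

-- ===== VERDICT (by name: the statement is the Claim_ definition above) =====
theorem get_ordered_vertices_spec : Claim_equal_get_ordered_vertices := by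
  intro n graph _ _
  unfold Spec_get_ordered_vertices
  exact main_equiv n graph
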